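-- pv_equiv track=rewrite | github.com/Uthaeus/codewars_python | 5kyu/two_strings.py | work_on_strings
-- ===== SOURCE A (Python) =====
-- def arrayify(s):
--     result = []
--     for c in s:
--         result.append(c)
--     return result
--
-- def work_on_strings(a,b):
--     x = 0
--     a = arrayify(a)
--     b = arrayify(b)
--
--     while x < len(a):
--         y = 0
--         while y < len(b):
--             if a[x].lower() == b[y].lower():
--                 b[y] = b[y].swapcase()
--             y += 1
--         x += 1
--     x = 0
--     while x < len(b):
--         y = 0
--         while y < len(a):
--             if b[x].lower() == a[y].lower():
--                 a[y] = a[y].swapcase()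
--             y += 1
--         x += 1
--
--     return "".join(a) + "".join(b)
-- ===== SOURCE B (Python) =====
-- def work_on_strings(a, b):
--     ca = {}
--     for c in a:
--         k = c.lower()
--         ca[k] = ca.get(k, 0) + 1
--     cb = {}
--     for c in b:
--         k = c.lower()
--         cb[k] = cb.get(k, 0) + 1
--     ra = ''.join(c.swapcase() if cb.get(c.lower(), 0) % 2 else c for c in a)
--     rb = ''.join(c.swapcase() if ca.get(c.lower(), 0) % 2 else c for c in b)
--     return ra + rb
-- ===== Notes on version B (the rewrite author's own statement) =====
-- stated objective: faster
-- what changed: Replaces the two O(n*m) nested scans with one pass building case-insensitive character counters for each string, then swapcases each character iff its match-count in the other string is odd (swapcase is an involution, so only parity matters).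
import Mathlib
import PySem

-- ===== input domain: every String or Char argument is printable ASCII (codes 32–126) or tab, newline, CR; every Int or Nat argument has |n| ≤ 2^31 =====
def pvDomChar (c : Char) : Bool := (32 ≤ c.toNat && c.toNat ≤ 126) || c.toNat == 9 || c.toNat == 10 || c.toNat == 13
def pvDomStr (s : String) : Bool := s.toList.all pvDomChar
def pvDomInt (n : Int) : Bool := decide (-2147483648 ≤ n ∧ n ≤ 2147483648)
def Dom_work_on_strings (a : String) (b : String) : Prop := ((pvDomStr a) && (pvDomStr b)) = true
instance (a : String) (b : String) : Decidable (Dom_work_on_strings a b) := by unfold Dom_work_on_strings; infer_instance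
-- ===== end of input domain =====

-- B replaces A's two O(n*m) nested match-and-swap scans by one pass of case-insensitive
-- counters plus a parity test per character (objective: faster, asymptotically).

-- ===== PORT A =====

-- Python str.swapcase() on one character, exact on the ASCII domain (upper ↔ lower, others unchanged)
def swapChar (c : Char) : Char :=
  if PySem.Chars.isupper c then PySem.Chars.lowerChar c
  else if PySem.Chars.islower c then PySem.Chars.upperChar c
  else c

-- helper arrayify of Source A: build the character list by appending one char at a time
def arrayify (s : String) : List Char :=
  s.toList.foldl (fun result c => result ++ [c]) []

-- inner while loop: walk tgt, swapcasing each element matching cx case-insensitively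
def pvInnerLoop (cx : Char) : List Char → List Char
  | [] => []
  | cy :: rest =>
      (if PySem.Chars.lowerChar cx = PySem.Chars.lowerChar cy then swapChar cy else cy)
        :: pvInnerLoop cx rest

def work_on_strings (a : String) (b : String) : String :=
  let la := arrayify a
  let lb := arrayify b
  -- first nested while: for each char of a, swapcase the matching chars of b
  let lb2 := la.foldl (fun t cx => pvInnerLoop cx t) lb
  -- second nested while: for each char of (modified) b, swapcase the matching chars of a
  let la2 := lb2.foldl (fun t cx => pvInnerLoop cx t) la
  String.ofList la2 ++ String.ofList lb2

-- ===== PORT B =====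

-- the case-insensitive counter loop of Source B: d[k] = d.get(k, 0) + 1 with k = c.lower()
def pvCount (l : List Char) : PySem.Dict Char Int :=
  l.foldl
    (fun d c =>
      d.insert (PySem.Chars.lowerChar c) (d.getD (PySem.Chars.lowerChar c) 0 + 1))
    PySem.Dict.empty

def work_on_strings_alt (a : String) (b : String) : String :=
  let ca := pvCount a.toList
  let cb := pvCount b.toList
  let ra := a.toList.map (fun c =>
    if PySem.Int.mod (cb.getD (PySem.Chars.lowerChar c) 0) 2 ≠ 0 then swapChar c else c)
  let rb := b.toList.map (fun c =>
    if PySem.Int.mod (ca.getD (PySem.Chars.lowerChar c) 0) 2 ≠ 0 then swapChar c else c)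
  String.ofList ra ++ String.ofList rb

-- ===== PRECONDITION & SPEC =====
def Spec_work_on_strings (a : String) (b : String) (out : String) : Prop := out = work_on_strings_alt a b
instance (a : String) (b : String) (out : String) : Decidable (Spec_work_on_strings a b out) := by unfold Spec_work_on_strings; infer_instance

-- ===== CLAIM (what is proved, stated in full; the proofs are below) =====
def Claim_equal_work_on_strings : Prop := ∀ (a : String) (b : String), Dom_work_on_strings a b → Spec_work_on_strings a b (work_on_strings a b)

-- ===== LEMMAS AND PROOFS =====

theorem toNat_ofNat_valid {n : Nat} (h : Nat.isValidChar n) : (Char.ofNat n).toNat = n := by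
  unfold Char.ofNat; simp [h, Char.ofNatAux, Char.toNat]

theorem le_iff_toNat {c d : Char} : c ≤ d ↔ c.toNat ≤ d.toNat := ge_iff_le

theorem upper_bounds {c : Char} (h : PySem.Chars.isupper c = true) : 65 ≤ c.toNat ∧ c.toNat ≤ 90 := by
  simp [PySem.Chars.isupper, le_iff_toNat] at h; exact h

theorem lower_bounds {c : Char} (h : PySem.Chars.islower c = true) : 97 ≤ c.toNat ∧ c.toNat ≤ 122 := by
  simp [PySem.Chars.islower, le_iff_toNat] at h; exact h

theorem isupper_eq_false {c : Char} (h : ¬ (65 ≤ c.toNat ∧ c.toNat ≤ 90)) : PySem.Chars.isupper c = false := by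
  simp [PySem.Chars.isupper, le_iff_toNat]; omega

theorem isupper_eq_true {c : Char} (h : 65 ≤ c.toNat ∧ c.toNat ≤ 90) : PySem.Chars.isupper c = true := by
  simp [PySem.Chars.isupper, le_iff_toNat]; omega

theorem islower_eq_true {c : Char} (h : 97 ≤ c.toNat ∧ c.toNat ≤ 122) : PySem.Chars.islower c = true := by
  simp [PySem.Chars.islower, le_iff_toNat]; omega

theorem lowerChar_of_not_upper {c : Char} (h : PySem.Chars.isupper c = false) :
    PySem.Chars.lowerChar c = c := by simp [PySem.Chars.lowerChar, h]

theorem toNat_lowerChar {c : Char} (h : PySem.Chars.isupper c = true) :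
    (PySem.Chars.lowerChar c).toNat = c.toNat + 32 := by
  obtain ⟨h1, h2⟩ := upper_bounds h
  simp [PySem.Chars.lowerChar, h, toNat_ofNat_valid (Or.inl (by omega : c.toNat + 32 < 0xD800))]

theorem toNat_upperChar {c : Char} (h : PySem.Chars.islower c = true) :
    (PySem.Chars.upperChar c).toNat = c.toNat - 32 := by
  obtain ⟨h1, h2⟩ := lower_bounds h
  simp [PySem.Chars.upperChar, h, toNat_ofNat_valid (Or.inl (by omega : c.toNat - 32 < 0xD800))]

-- lower ∘ swapcase = lower (swapcasing never changes the lowercase form)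
theorem lower_swap (c : Char) : PySem.Chars.lowerChar (swapChar c) = PySem.Chars.lowerChar c := by
  unfold swapChar
  by_cases hu : PySem.Chars.isupper c = true
  · obtain ⟨h1, h2⟩ := upper_bounds hu
    simp only [hu, if_true]
    exact lowerChar_of_not_upper (isupper_eq_false (by rw [toNat_lowerChar hu]; omega))
  · rw [Bool.not_eq_true] at hu
    by_cases hl : PySem.Chars.islower c = true
    · obtain ⟨h1, h2⟩ := lower_bounds hl
      simp only [hu, hl, if_true, Bool.false_eq_true, if_false]
      have hup : PySem.Chars.isupper (PySem.Chars.upperChar c) = true :=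
        isupper_eq_true (by rw [toNat_upperChar hl]; omega)
      rw [lowerChar_of_not_upper hu]
      simp only [PySem.Chars.lowerChar, hup, if_true, toNat_upperChar hl]
      have : c.toNat - 32 + 32 = c.toNat := by omega
      rw [this, Char.ofNat_toNat]
    · rw [Bool.not_eq_true] at hl
      simp [hu, hl]

-- swapcase is an involution
theorem swap_swap (c : Char) : swapChar (swapChar c) = c := by
  by_cases hu : PySem.Chars.isupper c = true
  · obtain ⟨h1, h2⟩ := upper_bounds hu
    have hd := toNat_lowerChar hu
    have hdu : PySem.Chars.isupper (PySem.Chars.lowerChar c) = false :=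
      isupper_eq_false (by omega)
    have hdl : PySem.Chars.islower (PySem.Chars.lowerChar c) = true :=
      islower_eq_true (by omega)
    simp only [swapChar, hu, if_true, hdu, Bool.false_eq_true, if_false, hdl]
    simp only [PySem.Chars.upperChar, hdl, if_true, hd]
    have : c.toNat + 32 - 32 = c.toNat := by omega
    rw [this, Char.ofNat_toNat]
  · rw [Bool.not_eq_true] at hu
    by_cases hl : PySem.Chars.islower c = true
    · obtain ⟨h1, h2⟩ := lower_bounds hl
      have hd := toNat_upperChar hl
      have hdu : PySem.Chars.isupper (PySem.Chars.upperChar c) = true :=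
        isupper_eq_true (by omega)
      simp only [swapChar, hu, Bool.false_eq_true, if_false, hl, if_true, hdu]
      simp only [PySem.Chars.lowerChar, hdu, if_true, hd]
      have : c.toNat - 32 + 32 = c.toNat := by omega
      rw [this, Char.ofNat_toNat]
    · rw [Bool.not_eq_true] at hl
      simp [swapChar, hu, hl]

theorem arrayify_eq (s : String) : arrayify s = s.toList := by
  unfold arrayify
  simpa using PySem.List.foldl_append_singleton s.toList []

-- the inner while loop is a pointwise map over the target list
theorem pvInnerLoop_eq_map (cx : Char) (l : List Char) :
    pvInnerLoop cx l =
      l.map (fun cy => if PySem.Chars.lowerChar cx = PySem.Chars.lowerChar cy then swapChar cy else cy) := by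
  induction l with
  | nil => rfl
  | cons cy rest ih => simp [pvInnerLoop, ih]

-- each outer pass swaps a char of tgt once per case-insensitive match in src: only the parity counts
theorem phase_eq (src tgt : List Char) :
    src.foldl (fun t cx => pvInnerLoop cx t) tgt =
      tgt.map (fun c =>
        if (src.countP (fun x => PySem.Chars.lowerChar x = PySem.Chars.lowerChar c)) % 2 = 1
        then swapChar c else c) := by
  induction src generalizing tgt with
  | nil => simp
  | cons cx src ih =>
      rw [List.foldl_cons, pvInnerLoop_eq_map, ih, List.map_map]
      apply List.map_congr_left
      intro c _
      simp only [Function.comp]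
      by_cases h : PySem.Chars.lowerChar cx = PySem.Chars.lowerChar c
      · simp only [if_true, lower_swap c, List.countP_cons, h, decide_true]
        rcases Nat.mod_two_eq_zero_or_one
            (src.countP (fun x => decide (PySem.Chars.lowerChar x = PySem.Chars.lowerChar c))) with h0 | h1
        · have hn : (src.countP (fun x => decide (PySem.Chars.lowerChar x = PySem.Chars.lowerChar c)) + 1) % 2 = 1 := by
            omega
          rw [if_neg (by omega), hn, if_pos rfl]
        · have hn : (src.countP (fun x => decide (PySem.Chars.lowerChar x = PySem.Chars.lowerChar c)) + 1) % 2 = 0 := by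
            omega
          rw [if_pos h1, swap_swap, hn]
          simp
      · simp only [List.countP_cons, h, decide_false, if_false]
        simp

-- the pass does not change lowercase forms, hence not the case-insensitive counts either
theorem countP_phase (src tgt : List Char) (k : Char) :
    (src.foldl (fun t cx => pvInnerLoop cx t) tgt).countP
        (fun x => PySem.Chars.lowerChar x = k) =
      tgt.countP (fun x => PySem.Chars.lowerChar x = k) := by
  rw [phase_eq, List.countP_map]
  apply List.countP_congr
  intro c _
  simp only [Function.comp]
  split_ifs with h
  · rw [lower_swap]
  · rfl

-- the counter dictionary of Source B holds exactly the case-insensitive occurrence counts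
theorem pvCount_getD (l : List Char) (k : Char) :
    (pvCount l).getD k 0 = ((l.countP (fun x => PySem.Chars.lowerChar x = k) : Nat) : Int) := by
  have go : ∀ (l : List Char) (d : PySem.Dict Char Int),
      (l.foldl
          (fun d c =>
            d.insert (PySem.Chars.lowerChar c) (d.getD (PySem.Chars.lowerChar c) 0 + 1)) d).getD k 0
        = d.getD k 0 + ((l.countP (fun x => PySem.Chars.lowerChar x = k) : Nat) : Int) := by
    intro l
    induction l with
    | nil => intro d; simp
    | cons c rest ih =>
        intro d
        rw [List.foldl_cons, ih, PySem.Dict.getD_insert, List.countP_cons]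
        by_cases h : k = PySem.Chars.lowerChar c
        · rw [if_pos h, h]
          simp
          omega
        · rw [if_neg h]
          have : decide (PySem.Chars.lowerChar c = k) = false := by
            simp; exact fun e => h e.symm
          simp [this]
  rw [pvCount, go, PySem.Dict.getD_empty]
  simp

-- ===== VERDICT (by name: the statement is the Claim_ definition above) =====
theorem work_on_strings_spec : Claim_equal_work_on_strings := by
  intro a b _
  unfold Spec_work_on_strings work_on_strings work_on_strings_alt
  simp only [arrayify_eq]
  congr 1
  · -- first joined piece: the modified a
    congr 1
    rw [phase_eq]
    apply List.map_congr_left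
    intro c _
    rw [countP_phase]
    rw [pvCount_getD]
    set n := b.toList.countP (fun x => PySem.Chars.lowerChar x = PySem.Chars.lowerChar c) with hn
    rw [PySem.Int.mod_eq_emod_of_pos (by norm_num)]
    by_cases h : n % 2 = 1
    · rw [if_pos h, if_pos (by omega)]
    · rw [if_neg h, if_neg (by omega)]
  · -- second joined piece: the modified b
    congr 1
    rw [phase_eq]
    apply List.map_congr_left
    intro c _
    rw [pvCount_getD]
    set n := a.toList.countP (fun x => PySem.Chars.lowerChar x = PySem.Chars.lowerChar c) with hn
    rw [PySem.Int.mod_eq_emod_of_pos (by norm_num)]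
    by_cases h : n % 2 = 1
    · rw [if_pos h, if_pos (by omega)]
    · rw [if_neg h, if_neg (by omega)]
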